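-- pv_equiv track=rewrite | github.com/songhee-lee/2023-python-coding-test | 기출문제/songhee/05. 행렬과 연산.py | solution
-- ===== SOURCE A (Python) =====
-- from collections import deque
--
-- def solution(rc, operations):
--     N, M = len(rc), len(rc[0])
--     left_col = deque([rc[i][0] for i in range(N)])
--     right_col = deque([rc[i][M-1] for i in range(N)])
--     rows = deque([deque(rc[i][1:M-1]) for i in range(N)])
--
--     for op in operations:
--         if op == "ShiftRow" :
--             left_col.appendleft(left_col.pop())
--             rows.appendleft(rows.pop())
--             right_col.appendleft(right_col.pop())
--         else :  # Rotate
--             rows[0].appendleft(left_col.popleft())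
--             right_col.appendleft(rows[0].pop())
--             rows[N-1].append(right_col.pop())
--             left_col.append(rows[N-1].popleft())
--
--     result = []
--     for i in range(N):
--         result.append( [left_col[i]]+ list(rows[i]) + [right_col[i]])
--     return result
-- ===== SOURCE B (Python) =====
-- def solution(rc, operations):
--     m = [list(row) for row in rc]
--     for op in operations:
--         if op == "ShiftRow":
--             m = m[-1:] + m[:-1]
--         else:  # Rotate the outer ring clockwise by one
--             n, k = len(m), len(m[0])
--             lefts = [row[0] for row in m]
--             rights = [row[k - 1] for row in m]
--             top = [lefts[1]] + m[0][:k - 1]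
--             bot = m[n - 1][1:] + [rights[n - 2]]
--             mid = [[lo] + row[1:k - 1] + [hi]
--                    for lo, row, hi in zip(lefts[2:], m[1:n - 1], rights[:n - 2])]
--             m = [top] + mid + [bot]
--     return m
-- ===== Notes on version B (the rewrite author's own statement) =====
-- stated objective: simpler
-- what changed: B keeps the state as the full matrix and applies each op directly on it (ShiftRow = rotate the row list, Rotate = rebuild the three kinds of rows from slices of their neighbours), instead of A's three separate deques (left column, right column, middle rows) threaded through deque surgery and reassembled at the end. …
-- outside the precondition, e.g. on solution([[1]], []): A returns [[1, 1]], B returns [[1]]; on solution([[1, 2, 3]], ['Rotate']): A returns [[1, 3, 2]], B raises IndexError; on solution([[1, 2], [3, 4, 5]], []): A returns [[1, 2], [3, 4]], B returns [[1, 2], [3, 4, 5]]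
import Mathlib
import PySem

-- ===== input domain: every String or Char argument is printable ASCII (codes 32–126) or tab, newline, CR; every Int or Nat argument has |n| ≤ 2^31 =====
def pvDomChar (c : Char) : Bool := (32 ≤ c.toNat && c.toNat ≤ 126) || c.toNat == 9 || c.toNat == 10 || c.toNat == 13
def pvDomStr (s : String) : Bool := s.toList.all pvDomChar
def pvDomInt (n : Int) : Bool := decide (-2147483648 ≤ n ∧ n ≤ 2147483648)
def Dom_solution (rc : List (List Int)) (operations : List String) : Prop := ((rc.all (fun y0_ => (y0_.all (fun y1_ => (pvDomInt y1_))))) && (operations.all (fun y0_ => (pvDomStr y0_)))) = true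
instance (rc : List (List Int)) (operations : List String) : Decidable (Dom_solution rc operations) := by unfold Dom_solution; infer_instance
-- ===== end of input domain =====

-- B maintains the full matrix and applies each operation on it directly (ShiftRow = rotate
-- the row list, Rotate = rebuild boundary rows from slices of their neighbours), instead of
-- A's three deques (left column, right column, middle rows); objective: simpler.


-- ===== PORT A =====
-- deque.appendleft(deque.pop()): move the last element to the front
def dequeRot {α : Type} (d : α) (l : List α) : List α := l.getLastD d :: l.dropLast

-- one iteration of A's operation loop; state = (left_col, rows, right_col), N fixed outside
def solnStepA (N : Nat) (st : List Int × List (List Int) × List Int) (op : String) :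
    List Int × List (List Int) × List Int :=
  if op = "ShiftRow" then
    (dequeRot 0 st.1, dequeRot [] st.2.1, dequeRot 0 st.2.2)
  else
    let l := st.1
    let rs := st.2.1
    let r := st.2.2
    let x := l.headD 0                                -- left_col.popleft()
    let l := l.tail
    let r0 := x :: rs.getD 0 []                       -- rows[0].appendleft(x)
    let y := r0.getLastD 0                            -- rows[0].pop()
    let r0 := r0.dropLast
    let rs := rs.set 0 r0
    let r := y :: r                                   -- right_col.appendleft(y)
    let z := r.getLastD 0                             -- right_col.pop()
    let r := r.dropLast
    let rn := rs.getD (N - 1) [] ++ [z]               -- rows[N-1].append(z)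
    let w := rn.headD 0                               -- rows[N-1].popleft()
    let rn := rn.tail
    let rs := rs.set (N - 1) rn
    let l := l ++ [w]                                 -- left_col.append(w)
    (l, rs, r)

def solution (rc : List (List Int)) (operations : List String) : List (List Int) :=
  let N := rc.length
  let M := (rc.headD []).length
  let left0 := (List.range N).map (fun i => (rc.getD i []).getD 0 0)
  let right0 := (List.range N).map (fun i => PySem.List.pyGetD (rc.getD i []) ((M : Int) - 1) 0)
  let rows0 := (List.range N).map (fun i => PySem.List.slice (rc.getD i []) (some 1) (some ((M : Int) - 1)))
  let st := operations.foldl (solnStepA N) (left0, rows0, right0)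
  (List.range N).foldl (fun acc i => acc ++ [st.1.getD i 0 :: st.2.1.getD i [] ++ [st.2.2.getD i 0]]) []

-- ===== PORT B =====
-- one iteration of B's loop on the full matrix m
def solnStepB (m : List (List Int)) (op : String) : List (List Int) :=
  if op = "ShiftRow" then
    PySem.List.slice m (some (-1)) none ++ PySem.List.slice m none (some (-1))
  else
    let n := m.length
    let k := (m.headD []).length
    let lefts := m.map (fun row => row.getD 0 0)
    let rights := m.map (fun row => PySem.List.pyGetD row ((k : Int) - 1) 0)
    let top := lefts.getD 1 0 :: PySem.List.slice (m.getD 0 []) none (some ((k : Int) - 1))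
    let bot := PySem.List.slice (m.getD (n - 1) []) (some 1) none ++ [PySem.List.pyGetD rights ((n : Int) - 2) 0]
    let mid := List.zipWith3
      (fun lo row hi => lo :: PySem.List.slice row (some 1) (some ((k : Int) - 1)) ++ [hi])
      (PySem.List.slice lefts (some 2) none)
      (PySem.List.slice m (some 1) (some ((n : Int) - 1)))
      (PySem.List.slice rights none (some ((n : Int) - 2)))
    top :: (mid ++ [bot])

def solution_alt (rc : List (List Int)) (operations : List String) : List (List Int) :=
  operations.foldl solnStepB (rc.map (fun row => row))

-- ===== PRECONDITION & SPEC =====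
-- Pre_ restricts to the problem's stated domain: rectangular matrices with both dimensions ≥ 2.
-- Outside it A still returns on some inputs (1-wide matrices: a duplicated column; ragged
-- matrices with over-long rows: truncated rows; 1-tall matrices: an accidental deque shuffle),
-- all artifacts of A's aliased/sliced deque columns that a full-matrix implementation has no
-- reason to reproduce; B raises or returns the natural full-matrix value there.
def Pre_solution (rc : List (List Int)) (operations : List String) : Prop :=
  2 ≤ rc.length ∧ 2 ≤ (rc.headD []).length ∧ ∀ row ∈ rc, row.length = (rc.headD []).length
instance (rc : List (List Int)) (operations : List String) : Decidable (Pre_solution rc operations) := by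
  unfold Pre_solution; infer_instance
def pvWitness_solution : List (List Int) × List String := ([[1, 2], [3, 4]], ["Rotate", "ShiftRow"])
def Spec_solution (rc : List (List Int)) (operations : List String) (out : List (List Int)) : Prop := out = solution_alt rc operations
instance (rc : List (List Int)) (operations : List String) (out : List (List Int)) : Decidable (Spec_solution rc operations out) := by unfold Spec_solution; infer_instance

-- ===== CLAIM (what is proved, stated in full; the proofs are below) =====
def Claim_equal_solution : Prop := ∀ (rc : List (List Int)) (operations : List String), Dom_solution rc operations → Pre_solution rc operations → Spec_solution rc operations (solution rc operations)

-- ===== LEMMAS AND PROOFS =====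

-- abstraction of a row into A's three deques: first element, middle part, last element
def rHd (row : List Int) : Int := row.headD 0
def rMid (row : List Int) : List Int := row.tail.dropLast
def rLst (row : List Int) : Int := row.getLastD 0
def Shape (M : Nat) (m : List (List Int)) : Prop := ∀ row ∈ m, row.length = M

-- generic list facts specific to the shapes used here
lemma headD_cons_tail {α : Type} (l : List α) (h : l ≠ []) (d : α) : l.headD d :: l.tail = l := by
  cases l with
  | nil => exact absurd rfl h
  | cons a t => rfl

lemma getD_zero_headD {α : Type} (l : List α) (d : α) : l.getD 0 d = l.headD d := by
  cases l <;> rfl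

lemma map_getLastD {α β : Type} (f : α → β) (l : List α) (h : l ≠ []) (d : β) (d' : α) :
    (l.map f).getLastD d = f (l.getLastD d') := by
  rw [List.getLastD_eq_getLast?, List.getLastD_eq_getLast?, List.getLast?_map]
  cases hl : l.getLast? with
  | none => simp [List.getLast?_eq_none_iff] at hl; exact absurd hl h
  | some v => simp

lemma range_map_getD {α β : Type} (xs : List α) (d : α) (f : α → β) :
    (List.range xs.length).map (fun i => f (xs.getD i d)) = xs.map f := by
  apply List.ext_getElem
  · simp
  · intro i h1 h2
    simp only [List.getElem_map, List.getElem_range]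
    rw [List.getD_eq_getElem xs d (by simpa using h2)]

lemma getD_append_self {α : Type} (xs : List α) (v : α) (ys : List α) (d : α) :
    (xs ++ v :: ys).getD xs.length d = v := by
  simp [List.getD_eq_getElem?_getD]

lemma set_append_self {α : Type} (xs : List α) (v : α) (ys : List α) (c : α) :
    (xs ++ v :: ys).set xs.length c = xs ++ c :: ys := by
  simp

lemma tail_append_of_ne_nil {α : Type} (xs ys : List α) (h : xs ≠ []) :
    (xs ++ ys).tail = xs.tail ++ ys := by
  cases xs with
  | nil => exact absurd rfl h
  | cons a t => rfl

-- row-level identities (row.length = M ≥ 2)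
lemma getLastD_eq_getLast {α : Type} (l : List α) (h : l ≠ []) (d : α) : l.getLastD d = l.getLast h := by
  rw [List.getLastD_eq_getLast?, List.getLast?_eq_getLast_of_ne_nil h]; rfl

lemma row_dropLast (row : List Int) (M : Nat) (hM : 2 ≤ M) (hr : row.length = M) :
    rHd row :: rMid row = row.dropLast := by
  cases row with
  | nil => rw [List.length_nil] at hr; omega
  | cons x r1 =>
    cases r1 with
    | nil => rw [List.length_cons, List.length_nil] at hr; omega
    | cons y t => rfl

lemma row_tail (row : List Int) (M : Nat) (hM : 2 ≤ M) (hr : row.length = M) :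
    rMid row ++ [rLst row] = row.tail := by
  cases row with
  | nil => rw [List.length_nil] at hr; omega
  | cons a r1 =>
    cases r1 with
    | nil => rw [List.length_cons, List.length_nil] at hr; omega
    | cons b t =>
      show (b :: t).dropLast ++ [(a :: b :: t).getLastD 0] = b :: t
      rw [show (a :: b :: t).getLastD 0 = (b :: t).getLastD 0 by
        rw [List.getLastD_eq_getLast?, List.getLastD_eq_getLast?, List.getLast?_cons_cons]]
      rw [getLastD_eq_getLast (b :: t) (by simp) 0]
      exact List.dropLast_append_getLast (by simp)

lemma row_assemble (row : List Int) (M : Nat) (hM : 2 ≤ M) (hr : row.length = M) :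
    rHd row :: rMid row ++ [rLst row] = row := by
  rw [List.cons_append, row_tail row M hM hr]
  have hne : row ≠ [] := by intro h; rw [h] at hr; simp at hr; omega
  exact headD_cons_tail row hne 0

-- slice/index normalisation on a row of length M ≥ 2
lemma norm_last (row : List Int) (M : Nat) (hM : 2 ≤ M) (hr : row.length = M) :
    PySem.List.pyGetD row ((M : Int) - 1) 0 = rLst row := by
  have hne : row ≠ [] := by intro h; rw [h] at hr; simp at hr; omega
  rw [show ((M : Int) - 1) = ((M - 1 : Nat) : Int) by omega, PySem.List.pyGetD_natCast]
  rw [List.getD_eq_getElem row 0 (by omega), rLst, getLastD_eq_getLast row hne 0,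
    List.getLast_eq_getElem]
  congr 1
  omega

lemma norm_mid (row : List Int) (M : Nat) (hM : 1 ≤ M) (hr : row.length = M) :
    PySem.List.slice row (some 1) (some ((M : Int) - 1)) = rMid row := by
  rw [PySem.List.slice_toNat]
  · rw [Int.toNat_one, List.drop_one, rMid, List.dropLast_eq_take, List.length_tail, hr]
    congr 1
    omega
  · norm_num
  · omega

lemma norm_dropLast (row : List Int) (M : Nat) (hM : 1 ≤ M) (hr : row.length = M) :
    PySem.List.slice row none (some ((M : Int) - 1)) = row.dropLast := by
  rw [PySem.List.slice_to]
  · rw [List.dropLast_eq_take, hr]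
    congr 1
    omega
  · omega

-- zipWith3 facts for B's middle rows
lemma zipWith3_cons {α β γ δ : Type} (f : α → β → γ → δ) (a : α) (as : List α) (b : β)
    (bs : List β) (c : γ) (cs : List γ) :
    List.zipWith3 f (a :: as) (b :: bs) (c :: cs) = f a b c :: List.zipWith3 f as bs cs := rfl

lemma zipWith3_nil {α β γ δ : Type} (f : α → β → γ → δ) (bs : List β) (cs : List γ) :
    List.zipWith3 f [] bs cs = [] := rfl

lemma getLastD_cons_append_singleton {α : Type} (x : α) (l : List α) (v d : α) :
    ((x :: l) ++ [v]).getLastD d = v := by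
  rw [List.cons_append, List.getLastD_cons]
  simp

lemma zip3_map_hd (g : List Int → List Int) (as : List Int) (bs : List (List Int)) (cs : List Int)
    (h1 : bs.length = as.length) (h2 : cs.length = as.length) :
    (List.zipWith3 (fun lo row hi => lo :: g row ++ [hi]) as bs cs).map rHd = as := by
  induction as generalizing bs cs with
  | nil => rw [zipWith3_nil]; rfl
  | cons a as ih =>
    cases bs with
    | nil => simp at h1
    | cons b bs =>
      cases cs with
      | nil => simp at h2
      | cons c cs =>
        rw [zipWith3_cons, List.map_cons, ih bs cs (by simpa using h1) (by simpa using h2)]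
        rfl

lemma zip3_map_lst (g : List Int → List Int) (as : List Int) (bs : List (List Int)) (cs : List Int)
    (h1 : bs.length = as.length) (h2 : cs.length = as.length) :
    (List.zipWith3 (fun lo row hi => lo :: g row ++ [hi]) as bs cs).map rLst = cs := by
  induction as generalizing bs cs with
  | nil =>
    obtain rfl : cs = [] := List.length_eq_zero_iff.mp (by simpa using h2)
    rw [zipWith3_nil]
    rfl
  | cons a as ih =>
    cases bs with
    | nil => simp at h1
    | cons b bs =>
      cases cs with
      | nil => simp at h2
      | cons c cs =>
        rw [zipWith3_cons, List.map_cons, ih bs cs (by simpa using h1) (by simpa using h2)]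
        rw [show rLst ((a :: g b) ++ [c]) = c from getLastD_cons_append_singleton a (g b) c 0]

lemma zip3_map_mid (g : List Int → List Int) (as : List Int) (bs : List (List Int)) (cs : List Int)
    (h1 : bs.length = as.length) (h2 : cs.length = as.length) :
    (List.zipWith3 (fun lo row hi => lo :: g row ++ [hi]) as bs cs).map rMid = bs.map g := by
  induction as generalizing bs cs with
  | nil =>
    obtain rfl : bs = [] := List.length_eq_zero_iff.mp (by simpa using h1)
    rw [zipWith3_nil]
    rfl
  | cons a as ih =>
    cases bs with
    | nil => simp at h1
    | cons b bs =>
      cases cs with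
      | nil => simp at h2
      | cons c cs =>
        rw [zipWith3_cons, List.map_cons, ih bs cs (by simpa using h1) (by simpa using h2),
          List.map_cons]
        rw [show rMid ((a :: g b) ++ [c]) = g b from by
          rw [rMid, List.cons_append, List.tail_cons]
          simp]

lemma zip3_shape (g : List Int → List Int) (as : List Int) (bs : List (List Int)) (cs : List Int)
    (M : Nat) (hg : ∀ row ∈ bs, (g row).length = M - 2) (hM : 2 ≤ M)
    (h1 : bs.length = as.length) (h2 : cs.length = as.length) :
    (∀ r ∈ List.zipWith3 (fun lo row hi => lo :: g row ++ [hi]) as bs cs, r.length = M) ∧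
    (List.zipWith3 (fun lo row hi => lo :: g row ++ [hi]) as bs cs).length = as.length := by
  induction as generalizing bs cs with
  | nil => rw [zipWith3_nil]; exact ⟨by simp, rfl⟩
  | cons a as ih =>
    cases bs with
    | nil => simp at h1
    | cons b bs =>
      cases cs with
      | nil => simp at h2
      | cons c cs =>
        have hrec := ih bs cs (fun row hr => hg row (by simp [hr])) (by simpa using h1) (by simpa using h2)
        rw [zipWith3_cons]
        constructor
        · intro r hr
          rcases List.mem_cons.mp hr with rfl | hr
          · have hgb := hg b (by simp)
            simp only [List.length_append, List.length_cons, List.length_nil, hgb]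
            omega
          · exact hrec.1 r hr
        · rw [List.length_cons, List.length_cons, hrec.2]

-- the Rotate branch commutes with the abstraction
lemma headD_append_of_ne_nil {α : Type} (xs ys : List α) (d : α) (h : xs ≠ []) :
    (xs ++ ys).headD d = xs.headD d := by
  cases xs with
  | nil => exact absurd rfl h
  | cons a t => rfl

lemma getLastD_append_singleton {α : Type} (l : List α) (v d : α) : (l ++ [v]).getLastD d = v := by
  simp

lemma dropLast_append_singleton {α : Type} (l : List α) (v : α) : (l ++ [v]).dropLast = l := by
  simp

lemma slice_from_two {α : Type} (l : List α) : PySem.List.slice l (some 2) none = l.drop 2 := by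
  rw [PySem.List.slice_from] <;> simp

lemma slice_one_pred {α : Type} (l : List α) (n : Nat) (hn : 1 ≤ n) (hl : l.length = n) :
    PySem.List.slice l (some 1) (some ((n : Int) - 1)) = l.tail.dropLast := by
  rw [PySem.List.slice_toNat]
  · rw [Int.toNat_one, List.drop_one, List.dropLast_eq_take, List.length_tail, hl]
    congr 1
    omega
  · norm_num
  · omega

lemma slice_to_sub2 {α : Type} (l : List α) (n : Nat) (hn : 2 ≤ n) :
    PySem.List.slice l none (some ((n : Int) - 2)) = l.take (n - 2) := by
  rw [show ((n : Int) - 2) = ((n - 2 : Nat) : Int) by omega, PySem.List.slice_to_natCast]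

lemma pyGetD_sub2 (l : List Int) (n : Nat) (hn : 2 ≤ n) :
    PySem.List.pyGetD l ((n : Int) - 2) 0 = l.getD (n - 2) 0 := by
  rw [show ((n : Int) - 2) = ((n - 2 : Nat) : Int) by omega, PySem.List.pyGetD_natCast]

lemma bRot_eq (M : Nat) (hM : 2 ≤ M) (a b : List Int) (s : List (List Int))
    (ha : a.length = M) (hb : b.length = M) (hsr : ∀ row ∈ s, row.length = M)
    (op : String) (hop : ¬ op = "ShiftRow") :
    solnStepB (a :: (s ++ [b])) op
      = ((s.map rHd ++ [rHd b]).headD 0 :: a.dropLast)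
        :: (List.zipWith3
              (fun lo row hi => lo :: PySem.List.slice row (some 1) (some ((M : Int) - 1)) ++ [hi])
              (s.map rHd ++ [rHd b]).tail
              s
              ((rLst a :: (s.map rLst ++ [rLst b])).take s.length)
            ++ [b.tail ++ [(rLst a :: (s.map rLst ++ [rLst b])).getD s.length 0]]) := by
  have hall : ∀ row ∈ (a :: (s ++ [b])), row.length = M := by
    intro row hr
    rcases List.mem_cons.mp hr with rfl | hr
    · exact ha
    · rcases List.mem_append.mp hr with h | h
      · exact hsr _ h
      · rw [List.mem_singleton.mp h]
        exact hb
  simp only [solnStepB, if_neg hop, List.headD_cons]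
  rw [ha]
  rw [show (fun (row : List Int) => row.getD 0 0) = rHd from
    funext fun row => by rw [getD_zero_headD]; rfl]
  rw [List.map_congr_left (fun row hr => norm_last row M hM (hall row hr))]
  rw [List.getD_cons_zero]
  rw [norm_dropLast a M (by omega) ha]
  rw [slice_one_pred (a :: (s ++ [b])) ((a :: (s ++ [b])).length) (by simp) rfl]
  rw [slice_from_two]
  rw [slice_to_sub2 _ ((a :: (s ++ [b])).length) (by simp)]
  rw [pyGetD_sub2 _ ((a :: (s ++ [b])).length) (by simp)]
  rw [show (a :: (s ++ [b])).length - 1 = s.length + 1 by simp]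
  rw [show (a :: (s ++ [b])).length - 2 = s.length by simp]
  rw [List.getD_cons_succ]
  rw [getD_append_self]
  rw [PySem.List.slice_from_one]
  rw [List.tail_cons]
  rw [dropLast_append_singleton]
  rw [List.map_cons, List.map_append, List.map_cons, List.map_nil]
  rw [List.map_cons, List.map_append, List.map_cons, List.map_nil]
  rw [show (rHd a :: (s.map rHd ++ [rHd b])).drop 2 = (s.map rHd ++ [rHd b]).tail from by
    rw [List.drop_succ_cons, List.drop_one]]
  rw [show (rHd a :: (s.map rHd ++ [rHd b])).getD 1 0 = (s.map rHd ++ [rHd b]).headD 0 from by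
    rw [show (rHd a :: (s.map rHd ++ [rHd b])).getD 1 0 = (s.map rHd ++ [rHd b]).getD 0 0 from rfl,
      getD_zero_headD]]

lemma rot_core (M : Nat) (hM : 2 ≤ M) (a b : List Int) (s : List (List Int))
    (ha : a.length = M) (hb : b.length = M) (hsr : ∀ row ∈ s, row.length = M)
    (op : String) (hop : ¬ op = "ShiftRow") :
    solnStepA (a :: (s ++ [b])).length
        ((a :: (s ++ [b])).map rHd, (a :: (s ++ [b])).map rMid, (a :: (s ++ [b])).map rLst) op
      = ((solnStepB (a :: (s ++ [b])) op).map rHd,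
         (solnStepB (a :: (s ++ [b])) op).map rMid,
         (solnStepB (a :: (s ++ [b])) op).map rLst) := by
  have hadl : a.dropLast ≠ [] := by
    intro h
    have := congrArg List.length h
    rw [List.length_dropLast, ha] at this
    simp at this
    omega
  have hbt : b.tail ≠ [] := by
    intro h
    have := congrArg List.length h
    rw [List.length_tail, hb] at this
    simp at this
    omega
  -- A side, fully evaluated
  have hA : solnStepA (s.length + 2)
      (rHd a :: (s.map rHd ++ [rHd b]), rMid a :: (s.map rMid ++ [rMid b]),
        rLst a :: (s.map rLst ++ [rLst b])) op
      = ((s.map rHd ++ [rHd b]) ++ [b.tail.headD 0],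
         a.dropLast.dropLast :: (s.map rMid ++ [b.tail.tail]),
         a.dropLast.getLastD 0 :: rLst a :: s.map rLst) := by
    simp only [solnStepA, if_neg hop, List.headD_cons, List.tail_cons, List.getD_cons_zero]
    rw [row_dropLast a M hM ha]
    rw [List.set_cons_zero]
    rw [show s.length + 2 - 1 = s.length + 1 by omega]
    rw [List.getD_cons_succ, List.set_cons_succ]
    rw [show (s.map rMid ++ [rMid b]).getD s.length [] = rMid b from by
      rw [show s.length = (s.map rMid).length from (List.length_map ..).symm]
      exact getD_append_self (s.map rMid) (rMid b) [] []]
    rw [show (a.dropLast.getLastD 0 :: rLst a :: (s.map rLst ++ [rLst b])).getLastD 0 = rLst b from by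
      rw [List.getLastD_cons, List.getLastD_cons]
      exact getLastD_append_singleton (s.map rLst) (rLst b) (rLst a)]
    rw [show (a.dropLast.getLastD 0 :: rLst a :: (s.map rLst ++ [rLst b])).dropLast
        = a.dropLast.getLastD 0 :: rLst a :: s.map rLst from by
      rw [show a.dropLast.getLastD 0 :: rLst a :: (s.map rLst ++ [rLst b])
          = (a.dropLast.getLastD 0 :: rLst a :: s.map rLst) ++ [rLst b] from by simp]
      exact dropLast_append_singleton _ _]
    rw [row_tail b M hM hb]
    rw [show (s.map rMid ++ [rMid b]).set s.length b.tail.tail = s.map rMid ++ [b.tail.tail] from by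
      rw [show s.length = (s.map rMid).length from (List.length_map ..).symm]
      exact set_append_self (s.map rMid) (rMid b) [] b.tail.tail]
  -- assemble
  rw [show (a :: (s ++ [b])).map rHd = rHd a :: (s.map rHd ++ [rHd b]) from by
    rw [List.map_cons, List.map_append, List.map_cons, List.map_nil]]
  rw [show (a :: (s ++ [b])).map rMid = rMid a :: (s.map rMid ++ [rMid b]) from by
    rw [List.map_cons, List.map_append, List.map_cons, List.map_nil]]
  rw [show (a :: (s ++ [b])).map rLst = rLst a :: (s.map rLst ++ [rLst b]) from by
    rw [List.map_cons, List.map_append, List.map_cons, List.map_nil]]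
  rw [show (a :: (s ++ [b])).length = s.length + 2 by simp]
  rw [hA, bRot_eq M hM a b s ha hb hsr op hop]
  -- compute the three maps of B's result
  have h1 : s.length = (s.map rHd ++ [rHd b]).tail.length := by simp
  have h2 : ((rLst a :: (s.map rLst ++ [rLst b])).take s.length).length
      = (s.map rHd ++ [rHd b]).tail.length := by
    rw [List.length_take]
    simp
    omega
  have h3 : s.length < (rLst a :: (s.map rLst ++ [rLst b])).length := by simp
  have hcs : (rLst a :: (s.map rLst ++ [rLst b])).take s.length
        ++ [(rLst a :: (s.map rLst ++ [rLst b])).getD s.length 0]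
      = rLst a :: s.map rLst := by
    rw [List.getD_eq_getElem _ 0 h3]
    have h4 : (rLst a :: (s.map rLst ++ [rLst b])).take s.length
          ++ [(rLst a :: (s.map rLst ++ [rLst b]))[s.length]'h3]
        = (rLst a :: (s.map rLst ++ [rLst b])).take (s.length + 1) := by simp
    rw [h4, List.take_succ_cons, List.take_left' (by rw [List.length_map])]
  rw [List.map_cons, List.map_append, List.map_cons, List.map_nil,
    List.map_cons, List.map_append, List.map_cons, List.map_nil,
    List.map_cons, List.map_append, List.map_cons, List.map_nil]
  rw [zip3_map_hd _ _ _ _ h1 h2, zip3_map_lst _ _ _ _ h1 h2, zip3_map_mid _ _ _ _ h1 h2]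
  rw [List.map_congr_left (fun row hr => norm_mid row M (by omega) (hsr row hr))]
  rw [show rHd (b.tail ++ [(rLst a :: (s.map rLst ++ [rLst b])).getD s.length 0]) = b.tail.headD 0 from
    headD_append_of_ne_nil b.tail _ 0 hbt]
  rw [show rHd ((s.map rHd ++ [rHd b]).headD 0 :: a.dropLast) = (s.map rHd ++ [rHd b]).headD 0 from rfl]
  rw [show (s.map rHd ++ [rHd b]).headD 0 :: ((s.map rHd ++ [rHd b]).tail ++ [b.tail.headD 0])
      = (s.map rHd ++ [rHd b]) ++ [b.tail.headD 0] from by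
    rw [← List.cons_append, headD_cons_tail _ (by simp) 0]]
  rw [show rMid ((s.map rHd ++ [rHd b]).headD 0 :: a.dropLast) = a.dropLast.dropLast from rfl]
  rw [show rMid (b.tail ++ [(rLst a :: (s.map rLst ++ [rLst b])).getD s.length 0]) = b.tail.tail from by
    simp only [rMid]
    rw [tail_append_of_ne_nil b.tail _ hbt, dropLast_append_singleton]]
  rw [show rLst ((s.map rHd ++ [rHd b]).headD 0 :: a.dropLast) = a.dropLast.getLastD 0 from by
    simp only [rLst]
    rw [List.getLastD_cons, getLastD_eq_getLast a.dropLast hadl, ← getLastD_eq_getLast a.dropLast hadl 0]]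
  rw [show rLst (b.tail ++ [(rLst a :: (s.map rLst ++ [rLst b])).getD s.length 0])
      = (rLst a :: (s.map rLst ++ [rLst b])).getD s.length 0 from
    getLastD_append_singleton b.tail _ 0]
  rw [hcs]

lemma rot_shape (M : Nat) (hM : 2 ≤ M) (a b : List Int) (s : List (List Int))
    (ha : a.length = M) (hb : b.length = M) (hsr : ∀ row ∈ s, row.length = M)
    (op : String) (hop : ¬ op = "ShiftRow") :
    Shape M (solnStepB (a :: (s ++ [b])) op) ∧
    (solnStepB (a :: (s ++ [b])) op).length = (a :: (s ++ [b])).length := by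
  rw [bRot_eq M hM a b s ha hb hsr op hop]
  have hzip := zip3_shape (fun row => PySem.List.slice row (some 1) (some ((M : Int) - 1)))
    ((s.map rHd ++ [rHd b]).tail) s ((rLst a :: (s.map rLst ++ [rLst b])).take s.length) M
    (fun row hr => by
      show (PySem.List.slice row (some 1) (some ((M : Int) - 1))).length = M - 2
      rw [norm_mid row M (by omega) (hsr row hr)]
      simp only [rMid]
      rw [List.length_dropLast, List.length_tail, hsr row hr]
      omega)
    hM (by simp) (by rw [List.length_take]; simp; omega)
  constructor
  · intro r hr
    rcases List.mem_cons.mp hr with rfl | hr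
    · rw [List.length_cons, List.length_dropLast, ha]
      omega
    · rcases List.mem_append.mp hr with h | h
      · exact hzip.1 r h
      · rw [List.mem_singleton.mp h, List.length_append, List.length_tail, hb]
        simp
        omega
  · rw [List.length_cons, List.length_append, hzip.2]
    simp

-- one step commutes with the abstraction, and preserves the shape
lemma step_comm (M : Nat) (hM : 2 ≤ M) (m : List (List Int)) (hN : 2 ≤ m.length)
    (hs : Shape M m) (op : String) :
    solnStepA m.length (m.map rHd, m.map rMid, m.map rLst) op
      = ((solnStepB m op).map rHd, (solnStepB m op).map rMid, (solnStepB m op).map rLst) := by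
  have hmne : m ≠ [] := by intro h; rw [h] at hN; simp at hN
  by_cases hop : op = "ShiftRow"
  · have hB : solnStepB m op = m.getLast hmne :: m.dropLast := by
      rw [solnStepB, if_pos hop, PySem.List.slice_from_neg_one, PySem.List.slice_to_neg_one,
        List.drop_length_sub_one hmne]
      rfl
    have c1 : dequeRot 0 (m.map rHd) = (m.getLast hmne :: m.dropLast).map rHd := by
      rw [dequeRot, map_getLastD rHd m hmne 0 [], getLastD_eq_getLast m hmne [],
        List.map_cons, List.map_dropLast]
    have c2 : dequeRot [] (m.map rMid) = (m.getLast hmne :: m.dropLast).map rMid := by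
      rw [dequeRot, map_getLastD rMid m hmne [] [], getLastD_eq_getLast m hmne [],
        List.map_cons, List.map_dropLast]
    have c3 : dequeRot 0 (m.map rLst) = (m.getLast hmne :: m.dropLast).map rLst := by
      rw [dequeRot, map_getLastD rLst m hmne 0 [], getLastD_eq_getLast m hmne [],
        List.map_cons, List.map_dropLast]
    rw [hB, solnStepA, if_pos hop, c1, c2, c3]
  · obtain ⟨a, t, rfl⟩ : ∃ a t, m = a :: t := by
      cases m with
      | nil => simp at hN
      | cons a t => exact ⟨a, t, rfl⟩
    have htne : t ≠ [] := by intro h; rw [h] at hN; simp at hN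
    obtain ⟨s, b, rfl⟩ : ∃ s b, t = s ++ [b] :=
      ⟨t.dropLast, t.getLast htne, (List.dropLast_append_getLast htne).symm⟩
    exact rot_core M hM a b s (hs a (by simp)) (hs b (by simp))
      (fun row hr => hs row (by simp [hr])) op hop

lemma step_shape (M : Nat) (hM : 2 ≤ M) (m : List (List Int)) (hN : 2 ≤ m.length)
    (hs : Shape M m) (op : String) :
    Shape M (solnStepB m op) ∧ (solnStepB m op).length = m.length := by
  have hmne : m ≠ [] := by intro h; rw [h] at hN; simp at hN
  by_cases hop : op = "ShiftRow"
  · have hB : solnStepB m op = m.getLast hmne :: m.dropLast := by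
      rw [solnStepB, if_pos hop, PySem.List.slice_from_neg_one, PySem.List.slice_to_neg_one,
        List.drop_length_sub_one hmne]
      rfl
    rw [hB]
    constructor
    · intro row hrow
      rcases List.mem_cons.mp hrow with rfl | hrow
      · exact hs _ (List.getLast_mem hmne)
      · exact hs _ (List.dropLast_subset _ hrow)
    · simp [List.length_dropLast]
      omega
  · obtain ⟨a, t, rfl⟩ : ∃ a t, m = a :: t := by
      cases m with
      | nil => simp at hN
      | cons a t => exact ⟨a, t, rfl⟩
    have htne : t ≠ [] := by intro h; rw [h] at hN; simp at hN
    obtain ⟨s, b, rfl⟩ : ∃ s b, t = s ++ [b] :=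
      ⟨t.dropLast, t.getLast htne, (List.dropLast_append_getLast htne).symm⟩
    exact rot_shape M hM a b s (hs a (by simp)) (hs b (by simp))
      (fun row hr => hs row (by simp [hr])) op hop

lemma fold_comm (M : Nat) (hM : 2 ≤ M) (ops : List String) :
    ∀ m : List (List Int), 2 ≤ m.length → Shape M m →
    ops.foldl (solnStepA m.length) (m.map rHd, m.map rMid, m.map rLst)
      = ((ops.foldl solnStepB m).map rHd, (ops.foldl solnStepB m).map rMid, (ops.foldl solnStepB m).map rLst)
    ∧ Shape M (ops.foldl solnStepB m) ∧ (ops.foldl solnStepB m).length = m.length := by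
  induction ops with
  | nil => intro m hN hs; exact ⟨rfl, hs, rfl⟩
  | cons op ops ih =>
    intro m hN hs
    have hstep := step_comm M hM m hN hs op
    have hshape := step_shape M hM m hN hs op
    have h2 : 2 ≤ (solnStepB m op).length := by rw [hshape.2]; exact hN
    obtain ⟨he, hsh, hlen⟩ := ih (solnStepB m op) h2 hshape.1
    simp only [List.foldl_cons]
    rw [hstep, show m.length = (solnStepB m op).length from hshape.2.symm]
    exact ⟨he, hsh, by rw [hlen, hshape.2]⟩

-- specialised getD-through-map facts used by the initial and final translation
lemma getD_map_rHd (m : List (List Int)) (i : Nat) : (m.map rHd).getD i 0 = rHd (m.getD i []) := by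
  rcases lt_or_ge i m.length with h | h
  · simp [List.getD_eq_getElem?_getD, List.getElem?_map, List.getElem?_eq_getElem h]
  · simp [List.getD_eq_getElem?_getD, List.getElem?_eq_none (by simpa using h), rHd]

lemma getD_map_rMid (m : List (List Int)) (i : Nat) : (m.map rMid).getD i [] = rMid (m.getD i []) := by
  rcases lt_or_ge i m.length with h | h
  · simp [List.getD_eq_getElem?_getD, List.getElem?_map, List.getElem?_eq_getElem h]
  · simp [List.getD_eq_getElem?_getD, List.getElem?_eq_none (by simpa using h), rMid]

lemma getD_map_rLst (m : List (List Int)) (i : Nat) : (m.map rLst).getD i 0 = rLst (m.getD i []) := by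
  rcases lt_or_ge i m.length with h | h
  · simp [List.getD_eq_getElem?_getD, List.getElem?_map, List.getElem?_eq_getElem h]
  · simp [List.getD_eq_getElem?_getD, List.getElem?_eq_none (by simpa using h), rLst]

-- ===== VERDICT (by name: the statement is the Claim_ definition above) =====
theorem solution_spec : Claim_equal_solution := by
  intro rc operations _ hpre
  obtain ⟨hN, hM, hrows⟩ := hpre
  unfold Spec_solution
  simp only [solution, solution_alt]
  have hshape : Shape ((rc.headD []).length) rc := hrows
  have hinit1 : (List.range rc.length).map (fun i => (rc.getD i []).getD 0 0) = rc.map rHd := by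
    rw [show (fun i => (rc.getD i []).getD 0 0) = (fun i => rHd (rc.getD i [])) from
      funext (fun i => by rw [getD_zero_headD]; rfl)]
    exact range_map_getD rc [] rHd
  have hinit2 : (List.range rc.length).map
      (fun i => PySem.List.pyGetD (rc.getD i []) (((rc.headD []).length : Int) - 1) 0) = rc.map rLst := by
    rw [range_map_getD rc [] (fun row => PySem.List.pyGetD row (((rc.headD []).length : Int) - 1) 0)]
    exact List.map_congr_left (fun row hr => norm_last row _ hM (hrows row hr))
  have hinit3 : (List.range rc.length).map
      (fun i => PySem.List.slice (rc.getD i []) (some 1) (some (((rc.headD []).length : Int) - 1))) = rc.map rMid := by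
    rw [range_map_getD rc [] (fun row => PySem.List.slice row (some 1) (some (((rc.headD []).length : Int) - 1)))]
    exact List.map_congr_left (fun row hr => norm_mid row _ (by omega) (hrows row hr))
  rw [hinit1, hinit2, hinit3]
  obtain ⟨he, hsh, hlen⟩ := fold_comm ((rc.headD []).length) hM operations rc hN hshape
  rw [he]
  rw [PySem.List.foldl_append_singleton_eq_map]
  rw [show rc.map (fun row => row) = rc from by simp]
  rw [show rc.length = (operations.foldl solnStepB rc).length from hlen.symm]
  rw [show (fun i => ((operations.foldl solnStepB rc).map rHd).getD i 0 ::
        ((operations.foldl solnStepB rc).map rMid).getD i [] ++ [((operations.foldl solnStepB rc).map rLst).getD i 0])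
      = (fun i => (fun row => rHd row :: rMid row ++ [rLst row]) ((operations.foldl solnStepB rc).getD i [])) from
    funext (fun i => by rw [getD_map_rHd, getD_map_rMid, getD_map_rLst])]
  rw [range_map_getD (operations.foldl solnStepB rc) [] (fun row => rHd row :: rMid row ++ [rLst row])]
  calc (operations.foldl solnStepB rc).map (fun row => rHd row :: rMid row ++ [rLst row])
      = (operations.foldl solnStepB rc).map (fun row => row) :=
        List.map_congr_left (fun row hr => row_assemble row _ hM (hsh row hr))
    _ = operations.foldl solnStepB rc := by simp
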